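-- pv_equiv track=rewrite | github.com/SaikyoSaru/Python-Security-Cryptography | Ha2/DisclosureAttack.py | checkDisjoint
-- ===== SOURCE A (Python) =====
-- def checkDisjoint(sets):
--     disjoint_sets = []
--     not_disjoint_sets = []
--     disjoint = True
--     for s in sets:
--         for n in disjoint_sets:
--             if not s.isdisjoint(n):
--                 not_disjoint_sets.append(s)
--                 disjoint = False
--                 break
--         if (disjoint):
--             disjoint_sets.append(s)
--         disjoint = True
--     return disjoint_sets, not_disjoint_sets
-- ===== SOURCE B (Python) =====
-- def checkDisjoint(sets):
--     # Pass 1: one running union of accepted elements decides each set's fate once.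
--     seen = set()
--     flags = []
--     for s in sets:
--         ok = seen.isdisjoint(s)
--         flags.append(ok)
--         if ok:
--             seen.update(s)
--     # Pass 2: split by the precomputed flags.
--     disjoint_sets = [s for s, ok in zip(sets, flags) if ok]
--     not_disjoint_sets = [s for s, ok in zip(sets, flags) if not ok]
--     return disjoint_sets, not_disjoint_sets
-- ===== Notes on version B (the rewrite author's own statement) =====
-- stated objective: alternative
-- what changed: B replaces A's inner scan over all previously accepted sets by a staged design: one pass computes a boolean flag per set against a single running union of accepted elements, then two filters split the input by the flags.
import Mathlib
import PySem

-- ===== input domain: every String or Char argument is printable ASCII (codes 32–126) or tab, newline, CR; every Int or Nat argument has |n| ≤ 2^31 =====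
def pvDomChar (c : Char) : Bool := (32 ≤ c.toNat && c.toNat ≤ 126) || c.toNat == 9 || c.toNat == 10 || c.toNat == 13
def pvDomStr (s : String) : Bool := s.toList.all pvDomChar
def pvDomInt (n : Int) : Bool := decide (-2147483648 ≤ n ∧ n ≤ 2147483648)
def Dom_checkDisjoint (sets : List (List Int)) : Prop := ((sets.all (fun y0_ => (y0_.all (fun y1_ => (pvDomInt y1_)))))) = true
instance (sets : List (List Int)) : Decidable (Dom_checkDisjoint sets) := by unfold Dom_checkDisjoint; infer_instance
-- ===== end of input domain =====

-- B stages the work: one pass computes a flag per set against a single running union of accepted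
-- elements, then two filters split the input by the flags (objective: alternative, not measured faster).

-- ===== PORT A =====
-- A: for each s, scan the accepted disjoint_sets; on first overlap append s to not_disjoint_sets
-- (break); if no overlap, append s to disjoint_sets.
def chkLoopA : List (List Int) → List (List Int) → List (List Int) → List (List Int) × List (List Int)
  | [], dis, nd => (dis, nd)
  | s :: rest, dis, nd =>
    if dis.any (fun n => !(PySem.Set.isdisjoint s n)) then
      chkLoopA rest dis (nd ++ [s])
    else
      chkLoopA rest (dis ++ [s]) nd

def checkDisjoint (sets : List (List Int)) : List (List Int) × List (List Int) :=
  chkLoopA sets [] []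

-- ===== PORT B =====
-- B pass 1: flag for each set, against the running union 'seen' of accepted elements.
def chkFlags : List (List Int) → PySem.Set Int → List Bool
  | [], _ => []
  | s :: rest, seen =>
    let ok := PySem.Set.isdisjoint seen s
    ok :: chkFlags rest (if ok then PySem.Set.update seen s else seen)

-- B pass 2: the two filtered comprehensions over zip(sets, flags).
def checkDisjoint_alt (sets : List (List Int)) : List (List Int) × List (List Int) :=
  let flags := chkFlags sets PySem.Set.empty
  (((sets.zip flags).filter (fun p => p.2)).map Prod.fst,
   ((sets.zip flags).filter (fun p => !p.2)).map Prod.fst)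

-- ===== PRECONDITION & SPEC =====
def Spec_checkDisjoint (sets : List (List Int)) (out : List (List Int) × List (List Int)) : Prop := out = checkDisjoint_alt sets
instance (sets : List (List Int)) (out : List (List Int) × List (List Int)) : Decidable (Spec_checkDisjoint sets out) := by unfold Spec_checkDisjoint; infer_instance

-- ===== CLAIM (what is proved, stated in full; the proofs are below) =====
def Claim_equal_checkDisjoint : Prop := ∀ (sets : List (List Int)), Dom_checkDisjoint sets → Spec_checkDisjoint sets (checkDisjoint sets)

-- ===== LEMMAS AND PROOFS =====

-- The two overlap tests agree whenever 'seen' holds exactly the elements of the accepted sets.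
lemma overlap_eq (s : List Int) (dis : List (List Int)) (seen : PySem.Set Int)
    (hinv : ∀ x : Int, x ∈ seen ↔ ∃ n ∈ dis, x ∈ n) :
    (dis.any (fun n => !(PySem.Set.isdisjoint s n))) = !(PySem.Set.isdisjoint seen s) := by
  rcases h : PySem.Set.isdisjoint seen s with _ | _
  · rw [Bool.not_false, List.any_eq_true]
    have : ¬ (∀ x ∈ seen, x ∉ s) := by
      intro hall
      rw [← PySem.Set.isdisjoint_iff] at hall
      simp [hall] at h
    push_neg at this
    obtain ⟨x, hxseen, hxs⟩ := this
    obtain ⟨n, hn, hxn⟩ := (hinv x).1 hxseen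
    refine ⟨n, hn, ?_⟩
    have hnd : PySem.Set.isdisjoint s n = false := by
      rw [← Bool.not_eq_true, PySem.Set.isdisjoint_iff]
      push_neg
      exact ⟨x, hxs, by simpa using hxn⟩
    simp [hnd]
  · rw [Bool.not_true, List.any_eq_false]
    intro n hn
    have hd : PySem.Set.isdisjoint s n = true := by
      rw [PySem.Set.isdisjoint_iff]
      intro x hxs hxn
      exact ((PySem.Set.isdisjoint_iff seen s).mp h) x ((hinv x).2 ⟨n, hn, hxn⟩) hxs
    simp [hd]

-- A's loop equals "dis/nd extended by the flag-selected remainder of the input".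
lemma chkLoop_eq (sets : List (List Int)) :
    ∀ (dis nd : List (List Int)) (seen : PySem.Set Int),
      (∀ x : Int, x ∈ seen ↔ ∃ n ∈ dis, x ∈ n) →
      chkLoopA sets dis nd =
        (dis ++ ((sets.zip (chkFlags sets seen)).filter (fun p => p.2)).map Prod.fst,
         nd ++ ((sets.zip (chkFlags sets seen)).filter (fun p => !p.2)).map Prod.fst) := by
  induction sets with
  | nil => intro dis nd seen _; simp [chkLoopA, chkFlags]
  | cons s rest ih =>
    intro dis nd seen hinv
    rw [chkLoopA, overlap_eq s dis seen hinv]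
    rcases h : PySem.Set.isdisjoint seen s with _ | _
    · -- overlap: flag false, s goes to nd
      simp only [Bool.not_false, if_true]
      rw [ih dis (nd ++ [s]) seen hinv]
      simp [chkFlags, h]
    · -- no overlap: flag true, s accepted
      simp only [Bool.not_true, if_true]
      have hinv' : ∀ x : Int, x ∈ PySem.Set.update seen s ↔ ∃ n ∈ dis ++ [s], x ∈ n := by
        intro x
        rw [PySem.Set.mem_update, hinv x]
        constructor
        · rintro (⟨n, hn, hxn⟩ | hxs)
          · exact ⟨n, List.mem_append_left _ hn, hxn⟩
          · exact ⟨s, List.mem_append_right _ (List.mem_singleton.mpr rfl), hxs⟩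
        · rintro ⟨n, hn, hxn⟩
          rcases List.mem_append.mp hn with hn | hn
          · exact Or.inl ⟨n, hn, hxn⟩
          · exact Or.inr (by rwa [List.mem_singleton.mp hn] at hxn)
      rw [ih (dis ++ [s]) nd (PySem.Set.update seen s) hinv']
      simp [chkFlags, h]

-- ===== VERDICT (by name: the statement is the Claim_ definition above) =====
theorem checkDisjoint_spec : Claim_equal_checkDisjoint := by
  intro sets _
  show checkDisjoint sets = checkDisjoint_alt sets
  rw [checkDisjoint, chkLoop_eq sets [] [] PySem.Set.empty (by simp [PySem.Set.empty])]
  rfl
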